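-- pv_equiv track=rewrite | github.com/louism33/dailyProblems | day7.py | get_permutations
-- ===== SOURCE A (Python) =====
-- def get_permutations(number_string):
--     if len(number_string) < 2:
--         return 1
--
--     if len(number_string) == 2:
--         if can_permute(number_string):
--             return 2
--         return 1
--
--     number = get_permutations(number_string[2:])
--
--     if can_permute(number_string[:2]):
--         number += get_permutations(number_string[2:])
--
--     if can_permute(number_string[1:3]):
--         number += get_permutations(number_string[3:])
--
--     return number
--
-- def can_permute(string):
--     assert len(string) == 2
--     if string[0] == "1":
--         return True
--     return string[0] == "2" and string[1] in "123456"
-- ===== SOURCE B (Python) =====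
-- def can_permute2(a, b):
--     return a == "1" or (a == "2" and b in "123456")
--
-- def get_permutations(number_string):
--     # Bottom-up DP over suffixes with three rolling values: O(n) instead of A's exponential recursion.
--     n = len(number_string)
--     f1 = f2 = f3 = 1  # counts for suffixes starting at i+1, i+2, i+3
--     for i in range(n - 1, -1, -1):
--         suffix_len = n - i
--         if suffix_len < 2:
--             fi = 1
--         elif suffix_len == 2:
--             fi = 2 if can_permute2(number_string[i], number_string[i + 1]) else 1
--         else:
--             fi = (2 if can_permute2(number_string[i], number_string[i + 1]) else 1) * f2 \
--                  + (f3 if can_permute2(number_string[i + 1], number_string[i + 2]) else 0)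
--         f1, f2, f3 = fi, f1, f2
--     return f1
-- ===== Notes on version B (the rewrite author's own statement) =====
-- stated objective: faster
-- what changed: Replaced A's exponential branching recursion over string slices by a single right-to-left pass keeping three rolling suffix counts (bottom-up DP).
import Mathlib
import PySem

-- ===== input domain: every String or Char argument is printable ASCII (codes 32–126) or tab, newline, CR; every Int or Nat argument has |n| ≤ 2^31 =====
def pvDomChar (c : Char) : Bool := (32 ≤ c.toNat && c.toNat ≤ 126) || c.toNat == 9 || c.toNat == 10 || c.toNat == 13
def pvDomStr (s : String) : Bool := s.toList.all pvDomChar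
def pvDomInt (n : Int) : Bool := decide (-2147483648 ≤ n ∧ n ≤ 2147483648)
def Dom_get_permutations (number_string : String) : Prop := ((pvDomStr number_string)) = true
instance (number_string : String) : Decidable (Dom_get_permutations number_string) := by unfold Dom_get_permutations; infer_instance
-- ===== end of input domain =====

-- B replaces A's exponential branching recursion by a linear right-to-left pass with three rolling suffix counts (faster, asymptotically).

-- ===== PORT A =====
-- can_permute(string): string[0]=="1", or string[0]=="2" and string[1] in "123456"
-- (only ever called on length-2 slices, so the assert always passes and indexing is safe)
def can_permute (string : List Char) : Bool :=
  if PySem.List.pyGet? string 0 = some '1' then true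
  else
    decide (PySem.List.pyGet? string 0 = some '2') &&
      (match PySem.List.pyGet? string 1 with
       | some c => ("123456".toList).contains c
       | none => false)

-- structural transliteration of A: the deep patterns are the slices
-- number_string[:2], [1:3], [2:], [3:] of a string of length ≥ 3
def get_permutationsA : List Char → Int
  | [] => 1
  | [_] => 1
  | [a, b] => if can_permute [a, b] then 2 else 1
  | a :: b :: c :: rest =>
      let number := get_permutationsA (c :: rest)
      let number := if can_permute [a, b] then number + get_permutationsA (c :: rest) else number
      let number := if can_permute [b, c] then number + get_permutationsA rest else number
      number

def get_permutations (number_string : String) : Int :=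
  get_permutationsA number_string.toList

-- ===== PORT B =====
def can_permute2 (a b : Char) : Bool :=
  a == '1' || (a == '2' && ("123456".toList).contains b)

-- the right-to-left loop of Source B: one step per character, state = (f1, f2, f3),
-- the counts for the suffixes starting one, two and three positions further right
def goB : List Char → Int × Int × Int
  | [] => (1, 1, 1)
  | a :: rest =>
      let (f1, f2, f3) := goB rest
      let fi : Int :=
        match rest with
        | [] => 1
        | [b] => if can_permute2 a b then 2 else 1
        | b :: c :: _ =>
            (if can_permute2 a b then 2 else 1) * f2 +
              (if can_permute2 b c then f3 else 0)
      (fi, f1, f2)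

def get_permutations_alt (number_string : String) : Int :=
  (goB number_string.toList).1

-- ===== PRECONDITION & SPEC =====
def Spec_get_permutations (number_string : String) (out : Int) : Prop := out = get_permutations_alt number_string
instance (number_string : String) (out : Int) : Decidable (Spec_get_permutations number_string out) := by unfold Spec_get_permutations; infer_instance

-- ===== CLAIM (what is proved, stated in full; the proofs are below) =====
def Claim_equal_get_permutations : Prop := ∀ (number_string : String), Dom_get_permutations number_string → Spec_get_permutations number_string (get_permutations number_string)

-- ===== LEMMAS AND PROOFS =====

theorem can_permute_pair (a b : Char) : can_permute [a, b] = can_permute2 a b := by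
  simp [can_permute, can_permute2, PySem.List.pyGet?, PySem.List.pyIdx?]
  rcases Decidable.em (a = '1') with h | h <;> simp [beq_eq_decide, h]

theorem goB_eq (s : List Char) :
    goB s = (get_permutationsA s, get_permutationsA s.tail, get_permutationsA s.tail.tail) := by
  induction s with
  | nil => rfl
  | cons a rest ih =>
    rw [goB.eq_def]
    dsimp only
    rw [ih]
    rcases rest with _ | ⟨b, _ | ⟨c, rest⟩⟩
    · rfl
    · simp only [get_permutationsA, List.tail_cons, can_permute_pair]
    · simp only [get_permutationsA, List.tail_cons, can_permute_pair]
      split_ifs <;> ring_nf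

theorem get_permutations_spec : Claim_equal_get_permutations := by
  intro s _
  unfold Spec_get_permutations get_permutations get_permutations_alt
  rw [goB_eq]
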